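-- pv_equiv track=rewrite | github.com/kyh-25/shortread | test.py | build_c_table
-- ===== SOURCE A (Python) =====
-- from collections import defaultdict
--
-- def build_c_table(bwt):
--     """ C 테이블: 사전순으로 앞에 나오는 문자들의 개수 누적합 """
--     counts = defaultdict(int)
--     for c in bwt:
--         counts[c] += 1
--     c_table = {}
--     total = 0
--     for c in sorted(counts.keys()):
--         c_table[c] = total
--         total += counts[c]
--     return c_table
-- ===== SOURCE B (Python) =====
-- def build_c_table(bwt):
--     sorted_bwt = sorted(bwt)
--     c_table = {}
--     for i, c in enumerate(sorted_bwt):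
--         if c not in c_table:
--             c_table[c] = i
--     return c_table
-- ===== Notes on version B (the rewrite author's own statement) =====
-- stated objective: alternative
-- what changed: B sorts the whole BWT string and records, for each character, the index of its first occurrence in the sorted string (which equals the cumulative count), instead of building a count dictionary and summing counts over sorted distinct keys.
import Mathlib
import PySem

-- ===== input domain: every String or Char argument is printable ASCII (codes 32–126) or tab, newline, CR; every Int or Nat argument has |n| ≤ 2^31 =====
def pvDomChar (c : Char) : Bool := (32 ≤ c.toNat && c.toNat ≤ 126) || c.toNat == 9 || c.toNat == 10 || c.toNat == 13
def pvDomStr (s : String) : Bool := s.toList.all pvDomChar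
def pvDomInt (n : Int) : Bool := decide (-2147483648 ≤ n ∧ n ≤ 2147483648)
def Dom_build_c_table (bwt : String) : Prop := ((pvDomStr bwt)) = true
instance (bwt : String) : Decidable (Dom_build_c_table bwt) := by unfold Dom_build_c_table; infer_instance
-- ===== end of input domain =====

-- B replaces A's count-dictionary + cumulative-sum loop by sorting the whole string and
-- recording each character's first-occurrence index in the sorted string (alternative decomposition).

-- ===== PORT A =====
def build_c_table (bwt : String) : List (String × Int) :=
  let counts : PySem.Dict String Int :=
    (bwt.toList.map (fun c => String.ofList [c])).foldl
      (fun d c => d.modify c 0 (· + 1)) PySem.Dict.empty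
  let st := (PySem.List.sorted counts.keys (fun x => x) false).foldl
      (fun (st : PySem.Dict String Int × Int) c =>
        (st.1.insert c st.2, st.2 + counts.getD c 0)) (PySem.Dict.empty, 0)
  st.1.items

-- ===== PORT B =====
def build_c_table_alt (bwt : String) : List (String × Int) :=
  let sortedBwt := PySem.List.sorted (bwt.toList.map (fun c => String.ofList [c])) (fun x => x) false
  let d := (PySem.List.enumerate sortedBwt).foldl
      (fun (d : PySem.Dict String Int) p =>
        if d.contains p.2 then d else d.insert p.2 p.1) PySem.Dict.empty
  d.items

-- ===== PRECONDITION & SPEC =====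
def Spec_build_c_table (bwt : String) (out : List (String × Int)) : Prop := out = build_c_table_alt bwt
instance (bwt : String) (out : List (String × Int)) : Decidable (Spec_build_c_table bwt out) := by unfold Spec_build_c_table; infer_instance

-- ===== CLAIM (what is proved, stated in full; the proofs are below) =====
def Claim_equal_build_c_table : Prop := ∀ (bwt : String), Dom_build_c_table bwt → Spec_build_c_table bwt (build_c_table bwt)

-- ===== LEMMAS AND PROOFS =====

-- A's second loop: running prefix sums over the sorted distinct keys.
def psums (cnt : String → Int) : List String → Int → List (String × Int)
  | [], _ => []
  | k :: ks, t => (k, t) :: psums cnt ks (t + cnt k)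

-- B's loop: first-occurrence (key, index) pairs of the not-yet-seen characters.
def firsts : List String → Int → List String → List (String × Int)
  | [], _, _ => []
  | x :: xs, n, seen =>
    if x ∈ seen then firsts xs (n + 1) seen
    else (x, n) :: firsts xs (n + 1) (seen ++ [x])

-- the keys produced by B's loop
def newkeys : List String → List String → List String
  | [], _ => []
  | x :: xs, seen =>
    if x ∈ seen then newkeys xs seen
    else x :: newkeys xs (seen ++ [x])

theorem foldA (cnt : String → Int) :
    ∀ (ks : List String) (d : PySem.Dict String Int) (t : Int),
    (∀ k ∈ ks, d.contains k = false) → ks.Nodup →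
    (ks.foldl (fun st k => (st.1.insert k st.2, st.2 + cnt k)) (d, t)).1.items
      = d.items ++ psums cnt ks t := by
  intro ks
  induction ks with
  | nil => intro d t _ _; simp [psums]
  | cons k ks ih =>
    intro d t hfresh hnd
    have hk : d.contains k = false := hfresh k (by simp)
    simp only [List.foldl_cons, psums]
    rw [ih (d.insert k t) (t + cnt k) ?_ (List.nodup_cons.mp hnd).2]
    · rw [PySem.Dict.items_insert_of_not_contains d t hk]; simp
    · intro k' hk'
      rw [PySem.Dict.contains_insert]
      have hne : k' ≠ k := by rintro rfl; exact (List.nodup_cons.mp hnd).1 hk'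
      simp [hne, hfresh k' (List.mem_cons_of_mem _ hk')]

theorem foldB :
    ∀ (xs : List String) (n : Int) (d : PySem.Dict String Int),
    ((PySem.List.enumerate xs n).foldl
        (fun d (p : Int × String) => if d.contains p.2 then d else d.insert p.2 p.1) d).items
      = d.items ++ firsts xs n d.keys := by
  intro xs
  induction xs with
  | nil => intro n d; simp [PySem.List.enumerate_nil, firsts]
  | cons x xs ih =>
    intro n d
    rw [PySem.List.enumerate_cons]
    simp only [List.foldl_cons, firsts]
    rw [PySem.Dict.contains_eq_decide_mem_keys]
    by_cases hx : x ∈ d.keys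
    · simp only [hx, decide_true, if_pos, ih]
    · simp only [hx, decide_false, if_neg, Bool.false_eq_true, not_false_iff, ih]
      have hc : d.contains x = false := by
        rw [PySem.Dict.contains_eq_decide_mem_keys]; simp [hx]
      rw [PySem.Dict.items_insert_of_not_contains d n hc,
          PySem.Dict.keys_insert_of_not_contains d n hc]
      simp

theorem countP_lt_add_count (k : String) :
    ∀ (l : List String),
    l.countP (fun x => decide (x < k ∨ x = k)) = l.countP (fun x => decide (x < k)) + l.count k := by
  intro l
  induction l with
  | nil => simp
  | cons a l ih =>
    by_cases hlt : a < k <;> by_cases heq : a = k <;>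
      simp only [List.countP_cons, List.count_cons, ih, hlt, heq, decide_true, decide_false,
        or_true, or_false, or_self, beq_self_eq_true, beq_iff_eq,
        if_true, if_false, lt_self_iff_false, Bool.false_eq_true] <;> omega

theorem psums_eq (cs : List String) :
    ∀ (K : List String) (t : Int),
    K.Pairwise (· < ·) →
    (∀ x ∈ cs, x ∈ K ∨ ∀ j ∈ K, x < j) →
    (∀ k, K.head? = some k → t = (cs.countP (fun x => decide (x < k)) : Int)) →
    psums (fun k => (cs.count k : Int)) K t
      = K.map (fun k => (k, (cs.countP (fun x => decide (x < k)) : Int))) := by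
  intro K
  induction K with
  | nil => intro t _ _ _; simp [psums]
  | cons k ks ih =>
    intro t hp hmem ht
    obtain ⟨hk_lt, hp'⟩ := List.pairwise_cons.mp hp
    have ht0 : t = (cs.countP (fun x => decide (x < k)) : Int) := ht k rfl
    simp only [psums, List.map_cons]
    have hmem' : ∀ x ∈ cs, x ∈ ks ∨ ∀ j ∈ ks, x < j := by
      intro x hx
      rcases hmem x hx with hin | hall
      · rcases List.mem_cons.mp hin with rfl | hin
        · exact Or.inr (fun j hj => hk_lt j hj)
        · exact Or.inl hin
      · exact Or.inr (fun j hj => hall j (List.mem_cons_of_mem _ hj))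
    have hhead : ∀ k', ks.head? = some k' →
        t + (cs.count k : Int) = (cs.countP (fun x => decide (x < k')) : Int) := by
      intro k' hk'
      cases ks with
      | nil => simp at hk'
      | cons a tl =>
        have ha : a = k' := by simpa using hk'
        subst ha
        have hkk' : k < a := hk_lt a (List.mem_cons_self)
        have hge : ∀ x ∈ a :: tl, a ≤ x := by
          intro x hx
          rcases List.mem_cons.mp hx with rfl | hx
          · exact le_refl x
          · exact le_of_lt ((List.pairwise_cons.mp hp').1 x hx)
        have hiff : ∀ x ∈ cs, (x < a ↔ (x < k ∨ x = k)) := by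
          intro x hxcs
          constructor
          · intro hlt
            rcases hmem x hxcs with hin | hall
            · rcases List.mem_cons.mp hin with rfl | hin
              · exact Or.inr rfl
              · exact absurd hlt (not_lt.mpr (hge x hin))
            · exact Or.inl (hall k List.mem_cons_self)
          · rintro (h | rfl)
            · exact lt_trans h hkk'
            · exact hkk'
        have hc : cs.countP (fun x => decide (x < a))
            = cs.countP (fun x => decide (x < k ∨ x = k)) :=
          List.countP_congr (fun x hx => by simp only [decide_eq_true_eq]; exact hiff x hx)
        rw [ht0, hc, countP_lt_add_count k cs]
        push_cast; ring
    rw [ih (t + (cs.count k : Int)) hp' hmem' hhead, ht0]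

theorem mem_newkeys : ∀ (xs seen : List String) (k : String),
    k ∈ newkeys xs seen ↔ (k ∈ xs ∧ k ∉ seen) := by
  intro xs
  induction xs with
  | nil => intro seen k; simp [newkeys]
  | cons x xs ih =>
    intro seen k
    simp only [newkeys]
    by_cases hx : x ∈ seen
    · rw [if_pos hx, ih]
      constructor
      · rintro ⟨h1, h2⟩; exact ⟨List.mem_cons_of_mem _ h1, h2⟩
      · rintro ⟨h1, h2⟩
        rcases List.mem_cons.mp h1 with rfl | h1
        · exact absurd hx h2
        · exact ⟨h1, h2⟩
    · rw [if_neg hx]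
      simp only [List.mem_cons, ih, List.mem_append]
      constructor
      · rintro (rfl | ⟨h1, h2⟩)
        · exact ⟨Or.inl rfl, hx⟩
        · exact ⟨Or.inr h1, fun h => h2 (Or.inl h)⟩
      · rintro ⟨rfl | h1, h2⟩
        · exact Or.inl rfl
        · by_cases hk : k = x
          · exact Or.inl hk
          · exact Or.inr ⟨h1, fun h => by rcases h with h | h; exact h2 h; exact hk (by simpa using h)⟩

theorem pairwise_newkeys : ∀ (xs seen : List String),
    xs.Pairwise (· ≤ ·) → (∀ y ∈ seen, ∀ x ∈ xs, y ≤ x) →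
    (newkeys xs seen).Pairwise (· < ·) := by
  intro xs
  induction xs with
  | nil => intro seen _ _; simp [newkeys]
  | cons x xs ih =>
    intro seen hp hs
    obtain ⟨hx_le, hp'⟩ := List.pairwise_cons.mp hp
    simp only [newkeys]
    by_cases hx : x ∈ seen
    · rw [if_pos hx]
      exact ih seen hp' (fun y hy x' hx' => hs y hy x' (List.mem_cons_of_mem _ hx'))
    · rw [if_neg hx]
      refine List.pairwise_cons.mpr ⟨?_, ih (seen ++ [x]) hp' ?_⟩
      · intro k hk
        obtain ⟨hk1, hk2⟩ := (mem_newkeys xs (seen ++ [x]) k).mp hk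
        exact lt_of_le_of_ne (hx_le k hk1) (fun h => hk2 (by simp [h.symm]))
      · intro y hy x' hx'
        rcases List.mem_append.mp hy with h | h
        · exact hs y h x' (List.mem_cons_of_mem _ hx')
        · have hyx : y = x := by simpa using h
          subst hyx; exact hx_le x' hx'

theorem firsts_eq : ∀ (xs : List String) (n : Int) (seen : List String),
    xs.Pairwise (· ≤ ·) → (∀ y ∈ seen, ∀ x ∈ xs, y ≤ x) →
    firsts xs n seen = (newkeys xs seen).map
      (fun k => (k, n + (xs.countP (fun x => decide (x < k)) : Int))) := by
  intro xs
  induction xs with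
  | nil => intro n seen _ _; simp [firsts, newkeys]
  | cons x xs ih =>
    intro n seen hp hs
    obtain ⟨hx_le, hp'⟩ := List.pairwise_cons.mp hp
    simp only [firsts, newkeys]
    by_cases hx : x ∈ seen
    · rw [if_pos hx, if_pos hx,
        ih (n + 1) seen hp' (fun y hy x' hx' => hs y hy x' (List.mem_cons_of_mem _ hx'))]
      apply List.map_congr_left
      intro k hk
      obtain ⟨hk1, hk2⟩ := (mem_newkeys xs seen k).mp hk
      have hxk : x < k :=
        lt_of_le_of_ne (hs x hx k (List.mem_cons_of_mem _ hk1)) (fun h => hk2 (h ▸ hx))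
      simp only [List.countP_cons, hxk, decide_true, if_true, Prod.mk.injEq, true_and]
      push_cast; ring
    · rw [if_neg hx, if_neg hx,
        ih (n + 1) (seen ++ [x]) hp' ?_]
      · simp only [List.map_cons]
        congr 1
        · have h0 : (x :: xs).countP (fun z => decide (z < x)) = 0 := by
            apply List.countP_eq_zero.mpr
            intro z hz
            rcases List.mem_cons.mp hz with rfl | hz
            · simp
            · simpa using not_lt.mpr (hx_le z hz)
          rw [h0]; simp
        · apply List.map_congr_left
          intro k hk
          obtain ⟨hk1, hk2⟩ := (mem_newkeys xs (seen ++ [x]) k).mp hk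
          have hxk : x < k :=
            lt_of_le_of_ne (hx_le k hk1) (fun h => hk2 (by simp [h.symm]))
          simp only [List.countP_cons, hxk, decide_true, if_true, Prod.mk.injEq, true_and]
          push_cast; ring
      · intro y hy x' hx'
        rcases List.mem_append.mp hy with h | h
        · exact hs y h x' (List.mem_cons_of_mem _ hx')
        · have hyx : y = x := by simpa using h
          subst hyx; exact hx_le x' hx'

-- ===== VERDICT (by name: the statement is the Claim_ definition above) =====
theorem build_c_table_spec : Claim_equal_build_c_table := by
  intro bwt _
  unfold Spec_build_c_table build_c_table build_c_table_alt
  simp only []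
  rw [← PySem.Dict.counter_eq_foldl]
  rw [PySem.Dict.keys_counter]
  set cs := bwt.toList.map (fun c => String.ofList [c]) with hcs
  set K := PySem.List.sorted (PySem.Set.ofList cs) (fun x => x) false with hK
  set S := PySem.List.sorted cs (fun x => x) false with hS
  -- A side
  have hKnd : K.Nodup := ((PySem.List.sorted_perm _ _ _).nodup_iff).mpr (PySem.Set.nodup_ofList cs)
  have hA : (K.foldl (fun st k => (st.1.insert k st.2, st.2 + (PySem.Dict.counter cs).getD k 0))
      ((PySem.Dict.empty : PySem.Dict String Int), (0 : Int))).1.items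
      = psums (fun k => ((PySem.Dict.counter cs).getD k 0)) K 0 := by
    rw [foldA _ K PySem.Dict.empty 0 (fun k _ => PySem.Dict.contains_empty k) hKnd]
    simp [PySem.Dict.empty]
  have hcntf : (fun k => ((PySem.Dict.counter cs).getD k 0)) = fun k => ((cs.count k : Int)) :=
    funext (fun k => PySem.Dict.getD_counter cs k)
  have hApw : K.Pairwise (· < ·) := PySem.List.sorted_ofList_pairwise_lt cs
  have hAmem : ∀ x ∈ cs, x ∈ K ∨ ∀ j ∈ K, x < j := by
    intro x hx
    exact Or.inl ((PySem.List.mem_sorted _ _ _ _).mpr ((PySem.Set.mem_ofList cs x).mpr hx))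
  have hAhead : ∀ k, K.head? = some k → (0 : Int) = (cs.countP (fun x => decide (x < k)) : Int) := by
    intro k hk
    cases hKe : K with
    | nil => rw [hKe] at hk; simp at hk
    | cons m tl =>
      rw [hKe] at hk
      have hm : m = k := by simpa using hk
      subst hm
      have hle' : ∀ y ∈ PySem.Set.ofList cs, m ≤ y :=
        PySem.List.key_head_sorted_le (PySem.Set.ofList cs) (fun x => x) (hK ▸ hKe)
      have h0 : cs.countP (fun x => decide (x < m)) = 0 := by
        apply List.countP_eq_zero.mpr
        intro z hz
        simpa using not_lt.mpr (hle' z ((PySem.Set.mem_ofList cs z).mpr hz))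
      rw [h0]; simp
  -- B side
  have hSpw : S.Pairwise (· ≤ ·) := by
    have := PySem.List.sorted_pairwise cs (fun x => x)
    simpa using this
  have hB : ((PySem.List.enumerate S).foldl
      (fun (d : PySem.Dict String Int) p => if d.contains p.2 then d else d.insert p.2 p.1)
      PySem.Dict.empty).items = firsts S 0 [] := by
    rw [foldB S 0 PySem.Dict.empty]
    simp [PySem.Dict.empty, PySem.Dict.keys]
  have hNKpw : (newkeys S []).Pairwise (· < ·) :=
    pairwise_newkeys S [] hSpw (by simp)
  have hNKnd : (newkeys S []).Nodup := hNKpw.imp (fun h => ne_of_lt h)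
  have hperm : (newkeys S []).Perm (PySem.Set.ofList cs) := by
    rw [List.perm_ext_iff_of_nodup hNKnd (PySem.Set.nodup_ofList cs)]
    intro a
    rw [mem_newkeys, PySem.Set.mem_ofList]
    simp [hS, PySem.List.mem_sorted]
  have hKnk : K = newkeys S [] :=
    PySem.List.sorted_eq_of_perm_of_pairwise_lt (PySem.Set.ofList cs) (newkeys S []) (fun x => x)
      hperm (by simpa using hNKpw)
  have hScnt : ∀ k, S.countP (fun x => decide (x < k)) = cs.countP (fun x => decide (x < k)) :=
    fun k => (PySem.List.sorted_perm cs (fun x => x) false).countP_eq _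
  rw [hA, hcntf, psums_eq cs K 0 hApw hAmem hAhead, hB,
    firsts_eq S 0 [] hSpw (by simp), hKnk]
  apply List.map_congr_left
  intro k _
  rw [hScnt k]
  simp
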